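-- pv_equiv track=rewrite | github.com/VishalDeoPrasad/InterviewBit | 01. Arrays/Number of Pairs.py | StringPair1
-- ===== SOURCE A (Python) =====
-- def StringPair1(s):
--     cnt = 0
--     for i in range(len(s)-1):
--         if s[i] == 'a':
--             for j in range(i+1, len(s)):
--                 if s[j] == 'g':
--                     cnt += 1
--     return cnt
--
-- s = 'abcgaggadfdfgg'
-- ===== SOURCE B (Python) =====
-- def StringPair1(s):
--     acnt = 0
--     total = 0
--     for c in s:
--         if c == 'g':
--             total += acnt
--         elif c == 'a':
--             acnt += 1
--     return total
-- ===== Notes on version B (the rewrite author's own statement) =====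
-- stated objective: faster
-- what changed: Replaces the nested index loops (for each 'a', scan the rest for 'g') with a single pass keeping a running count of 'a's that is added to the total at every 'g'.
import Mathlib
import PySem

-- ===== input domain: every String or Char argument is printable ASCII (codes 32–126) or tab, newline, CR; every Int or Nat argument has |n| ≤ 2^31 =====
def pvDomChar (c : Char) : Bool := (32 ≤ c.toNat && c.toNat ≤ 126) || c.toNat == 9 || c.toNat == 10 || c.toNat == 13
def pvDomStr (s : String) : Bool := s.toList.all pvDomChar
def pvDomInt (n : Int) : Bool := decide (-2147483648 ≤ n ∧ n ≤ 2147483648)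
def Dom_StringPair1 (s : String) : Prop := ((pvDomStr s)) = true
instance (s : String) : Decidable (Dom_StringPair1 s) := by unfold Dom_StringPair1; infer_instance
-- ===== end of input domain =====

-- B replaces A's nested index scans with a single pass carrying a running count of 'a's (O(n) vs O(n^2)).


-- ===== PORT A =====
-- literal transliteration: for i in range(len(s)-1): if s[i]=='a': for j in range(i+1,len(s)): if s[j]=='g': cnt+=1
def StringPair1 (s : String) : Int :=
  let l := s.toList
  (PySem.List.pyRange 0 ((l.length : Int) - 1) 1).foldl (fun cnt i =>
    if PySem.List.pyGetD l i ' ' == 'a' then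
      (PySem.List.pyRange (i + 1) (l.length : Int) 1).foldl (fun c j =>
        if PySem.List.pyGetD l j ' ' == 'g' then c + 1 else c) cnt
    else cnt) 0

-- ===== PORT B =====
-- literal transliteration of Source B: one pass, state (acnt, total)
def StringPair1_alt (s : String) : Int :=
  (s.toList.foldl (fun (st : Int × Int) c =>
    if c == 'g' then (st.1, st.2 + st.1)
    else if c == 'a' then (st.1 + 1, st.2)
    else st) (0, 0)).2

-- ===== PRECONDITION & SPEC =====
def Spec_StringPair1 (s : String) (out : Int) : Prop := out = StringPair1_alt s
instance (s : String) (out : Int) : Decidable (Spec_StringPair1 s out) := by unfold Spec_StringPair1; infer_instance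

-- ===== CLAIM (what is proved, stated in full; the proofs are below) =====
def Claim_equal_StringPair1 : Prop := ∀ (s : String), Dom_StringPair1 s → Spec_StringPair1 s (StringPair1 s)

-- ===== LEMMAS AND PROOFS =====

-- number of 'g' in a list
def cntG : List Char → Int
  | [] => 0
  | c :: r => (if c == 'g' then 1 else 0) + cntG r

-- number of 'a' in a list
def cntA : List Char → Int
  | [] => 0
  | c :: r => (if c == 'a' then 1 else 0) + cntA r

-- number of pairs i < j with l[i]='a', l[j]='g'
def pairsAG : List Char → Int
  | [] => 0
  | c :: r => (if c == 'a' then cntG r else 0) + pairsAG r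

theorem cntG_foldl (l : List Char) (cnt : Int) :
    l.foldl (fun c ch => if ch == 'g' then c + 1 else c) cnt = cnt + cntG l := by
  induction l generalizing cnt with
  | nil => simp [cntG]
  | cons c r ih => simp only [List.foldl_cons, cntG, ih]; split <;> ring

theorem bstep_foldl (l : List Char) (a t : Int) :
    l.foldl (fun (st : Int × Int) c =>
      if c == 'g' then (st.1, st.2 + st.1)
      else if c == 'a' then (st.1 + 1, st.2)
      else st) (a, t) = (a + cntA l, t + a * cntG l + pairsAG l) := by
  induction l generalizing a t with
  | nil => simp [cntA, cntG, pairsAG]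
  | cons c r ih =>
    simp only [List.foldl_cons]
    by_cases hg : c = 'g'
    · subst hg
      rw [if_pos (by decide), ih]
      have h1 : ('g' == 'a') = false := by decide
      simp only [cntA, cntG, pairsAG, h1, beq_self_eq_true, if_true, if_false,
        Bool.false_eq_true, Prod.mk.injEq]
      constructor <;> ring
    · by_cases ha : c = 'a'
      · subst ha
        rw [if_neg (by decide), if_pos (by decide), ih]
        have h1 : ('a' == 'g') = false := by decide
        simp only [cntA, cntG, pairsAG, h1, beq_self_eq_true, if_true, if_false,
          Bool.false_eq_true, Prod.mk.injEq]
        constructor <;> ring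
      · rw [if_neg (by simp [hg]), if_neg (by simp [ha]), ih]
        simp only [cntA, cntG, pairsAG, beq_iff_eq, hg, ha, if_false, Prod.mk.injEq]
        constructor <;> ring

theorem alt_eq_pairsAG (s : String) : StringPair1_alt s = pairsAG s.toList := by
  unfold StringPair1_alt
  rw [bstep_foldl]
  simp

-- the inner loop of A counts the 'g's in the suffix after i
theorem inner_eq (l : List Char) (i : Int) (hi : 0 ≤ i) (cnt : Int) :
    (PySem.List.pyRange (i + 1) (l.length : Int) 1).foldl (fun c j =>
      if PySem.List.pyGetD l j ' ' == 'g' then c + 1 else c) cnt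
    = cnt + cntG (l.drop (i + 1).toNat) := by
  rw [PySem.List.foldl_pyRange_pyGetD' l ' '
      (fun c ch => if ch == 'g' then c + 1 else c) cnt (a := i + 1) (by omega)]
  exact cntG_foldl _ _

-- h-value of A's outer loop body
theorem outer_sum (l : List Char) (cnt : Int) :
    (PySem.List.pyRange 0 ((l.length : Int) - 1) 1).foldl (fun cnt i =>
      if PySem.List.pyGetD l i ' ' == 'a' then
        (PySem.List.pyRange (i + 1) (l.length : Int) 1).foldl (fun c j =>
          if PySem.List.pyGetD l j ' ' == 'g' then c + 1 else c) cnt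
      else cnt) cnt
    = cnt + ((PySem.List.pyRange 0 ((l.length : Int) - 1) 1).map (fun i =>
        if PySem.List.pyGetD l i ' ' == 'a' then cntG (l.drop (i + 1).toNat) else 0)).sum := by
  have hcong : ∀ (is : List Int) (c : Int), (∀ i ∈ is, 0 ≤ i) →
      is.foldl (fun cnt i =>
        if PySem.List.pyGetD l i ' ' == 'a' then
          (PySem.List.pyRange (i + 1) (l.length : Int) 1).foldl (fun c j =>
            if PySem.List.pyGetD l j ' ' == 'g' then c + 1 else c) cnt
        else cnt) c
      = c + (is.map (fun i =>
          if PySem.List.pyGetD l i ' ' == 'a' then cntG (l.drop (i + 1).toNat) else 0)).sum := by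
    intro is
    induction is with
    | nil => intro c _; simp
    | cons i rest ih =>
      intro c hpos
      simp only [List.foldl_cons, List.map_cons, List.sum_cons]
      have hi : 0 ≤ i := hpos i (by simp)
      rw [ih _ (fun j hj => hpos j (by simp [hj]))]
      by_cases ha : PySem.List.pyGetD l i ' ' == 'a'
      · rw [if_pos ha, if_pos ha, inner_eq l i hi]; ring
      · rw [if_neg ha, if_neg ha]; ring
  exact hcong _ cnt (fun i hi => by
    have := (PySem.List.mem_pyRange_one).mp hi
    omega)

-- Nat-indexed form of the outer summand
def gfun (l : List Char) (k : Nat) : Int :=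
  if l.getD k ' ' == 'a' then cntG (l.drop (k + 1)) else 0

theorem gfun_sum (l : List Char) :
    ((List.range (l.length - 1)).map (gfun l)).sum = pairsAG l := by
  induction l with
  | nil => simp [pairsAG]
  | cons c r ih =>
    cases r with
    | nil => simp [pairsAG, cntG]
    | cons d t =>
      have hlen : (c :: d :: t).length - 1 = ((d :: t).length - 1) + 1 := by
        simp
      rw [hlen, List.range_succ_eq_map]
      simp only [List.map_cons, List.sum_cons, List.map_map]
      have hg0 : gfun (c :: d :: t) 0 = (if c == 'a' then cntG (d :: t) else 0) := by
        simp [gfun]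
      have hshift : (gfun (c :: d :: t)) ∘ (· + 1) = gfun (d :: t) := by
        funext k; simp [gfun]
      rw [hg0, hshift, ih]
      simp [pairsAG]

theorem sum_shift (l : List Char) :
    ((PySem.List.pyRange 0 ((l.length : Int) - 1) 1).map (fun i =>
      if PySem.List.pyGetD l i ' ' == 'a' then cntG (l.drop (i + 1).toNat) else 0)).sum
    = pairsAG l := by
  rw [PySem.List.pyRange_one, List.map_map, ← gfun_sum l]
  congr 1
  have hn : ((l.length : Int) - 1 - 0).toNat = l.length - 1 := by omega
  rw [hn]
  apply List.map_congr_left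
  intro k _
  simp only [Function.comp, zero_add, gfun, PySem.List.pyGetD_natCast]
  have ht : ((k : Int) + 1).toNat = k + 1 := by omega
  rw [ht]

-- ===== VERDICT (by name: the statement is the Claim_ definition above) =====
theorem StringPair1_spec : Claim_equal_StringPair1 := by
  intro s _
  unfold Spec_StringPair1 StringPair1
  rw [alt_eq_pairsAG]
  simp only []
  rw [outer_sum, sum_shift]
  ring
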